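-- pv_equiv track=rewrite | github.com/Vsundan/MESTRE | app.py | _cluster_pages
-- ===== SOURCE A (Python) =====
-- def _cluster_pages(detected: list, max_gap: int = 4) -> list[list]:
--     """Group detected page indices into clusters where consecutive pages are within max_gap."""
--     if not detected:
--         return []
--     clusters = [[detected[0]]]
--     for i in range(1, len(detected)):
--         if detected[i] - detected[i - 1] <= max_gap:
--             clusters[-1].append(detected[i])
--         else:
--             clusters.append([detected[i]])
--     return clusters
-- ===== SOURCE B (Python) =====
-- def _cluster_pages(detected: list, max_gap: int = 4) -> list[list]:
--     """Group detected page indices into clusters where consecutive pages are within max_gap."""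
--     if not detected:
--         return []
--     n = len(detected)
--     boundaries = [i for i in range(1, n) if detected[i] - detected[i - 1] > max_gap]
--     cuts = [0] + boundaries + [n]
--     return [detected[cuts[j]:cuts[j + 1]] for j in range(len(cuts) - 1)]
-- ===== Notes on version B (the rewrite author's own statement) =====
-- stated objective: alternative
-- what changed: Replaces A's incremental loop that appends each page into the last cluster (or starts a new one) by a two-phase partition: collect the boundary indices where the gap exceeds max_gap, form cut points, and build each cluster as a slice between consecutive cuts.
import Mathlib
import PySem

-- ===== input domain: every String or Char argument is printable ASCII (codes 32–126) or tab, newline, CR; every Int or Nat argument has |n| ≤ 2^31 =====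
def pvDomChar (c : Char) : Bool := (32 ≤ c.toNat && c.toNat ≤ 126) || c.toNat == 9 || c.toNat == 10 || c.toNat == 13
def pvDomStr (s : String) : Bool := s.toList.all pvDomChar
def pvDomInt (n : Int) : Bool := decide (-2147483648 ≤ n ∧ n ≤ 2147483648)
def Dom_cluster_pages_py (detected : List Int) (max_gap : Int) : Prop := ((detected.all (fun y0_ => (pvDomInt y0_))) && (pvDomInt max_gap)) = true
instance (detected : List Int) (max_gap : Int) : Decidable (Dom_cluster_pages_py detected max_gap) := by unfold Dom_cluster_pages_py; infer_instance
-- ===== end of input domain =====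

-- B replaces A's incremental append-into-last-cluster loop by a two-phase shape:
-- collect the gap boundaries, then partition the list by slicing (alternative decomposition, same cost).

-- ===== PORT A =====
def cluster_pages_py (detected : List Int) (max_gap : Int) : List (List Int) :=
  if detected = [] then []
  else
    (PySem.List.pyRange 1 (detected.length : Int) 1).foldl
      (fun clusters i =>
        if PySem.List.pyGetD detected i 0 - PySem.List.pyGetD detected (i - 1) 0 ≤ max_gap then
          clusters.dropLast ++ [clusters.getLastD [] ++ [PySem.List.pyGetD detected i 0]]
        else
          clusters ++ [[PySem.List.pyGetD detected i 0]])
      [[PySem.List.pyGetD detected 0 0]]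

-- ===== PORT B =====
def cluster_pages_py_alt (detected : List Int) (max_gap : Int) : List (List Int) :=
  if detected = [] then []
  else
    let n : Int := (detected.length : Int)
    let boundaries : List Int := (PySem.List.pyRange 1 n 1).filter
      (fun i => decide (max_gap < PySem.List.pyGetD detected i 0 - PySem.List.pyGetD detected (i - 1) 0))
    let cuts : List Int := [0] ++ boundaries ++ [n]
    (PySem.List.pyRange 0 ((cuts.length : Int) - 1) 1).map
      (fun j => PySem.List.slice detected (some (PySem.List.pyGetD cuts j 0)) (some (PySem.List.pyGetD cuts (j + 1) 0)))

-- ===== PRECONDITION & SPEC =====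
def Spec_cluster_pages_py (detected : List Int) (max_gap : Int) (out : List (List Int)) : Prop := out = cluster_pages_py_alt detected max_gap
instance (detected : List Int) (max_gap : Int) (out : List (List Int)) : Decidable (Spec_cluster_pages_py detected max_gap out) := by unfold Spec_cluster_pages_py; infer_instance

-- ===== CLAIM (what is proved, stated in full; the proofs are below) =====
def Claim_equal_cluster_pages_py : Prop := ∀ (detected : List Int) (max_gap : Int), Dom_cluster_pages_py detected max_gap → Spec_cluster_pages_py detected max_gap (cluster_pages_py detected max_gap)

-- ===== LEMMAS AND PROOFS =====

-- the per-element update A's loop performs (proof-only abbreviation)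
def pvStep (g : Int) (cl : List (List Int)) (prev y : Int) : List (List Int) :=
  if y - prev ≤ g then cl.dropLast ++ [cl.getLastD [] ++ [y]] else cl ++ [[y]]

-- slices of xs between consecutive cut points (proof-only)
def pvSlices (xs : List Int) : Int → List Int → List (List Int)
  | _, [] => []
  | c, c' :: cs => PySem.List.slice xs (some c) (some c') :: pvSlices xs c' cs

-- B's boundary list (proof-only)
def pvBnd (xs : List Int) (g : Int) : List Int :=
  (PySem.List.pyRange 1 (xs.length : Int) 1).filter
    (fun i => decide (g < PySem.List.pyGetD xs i 0 - PySem.List.pyGetD xs (i - 1) 0))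

theorem pvSlices_length (xs : List Int) (c : Int) (cs : List Int) :
    (pvSlices xs c cs).length = cs.length := by
  induction cs generalizing c with
  | nil => rfl
  | cons c' cs ih => simp [pvSlices, ih]

theorem pvGetD_append_left (xs ys : List Int) (i d : Int) (h0 : 0 ≤ i) (h1 : i < xs.length) :
    PySem.List.pyGetD (xs ++ ys) i d = PySem.List.pyGetD xs i d := by
  rw [PySem.List.pyGetD_eq_getElem _ _ h0 (by simp; omega),
      PySem.List.pyGetD_eq_getElem _ _ h0 (by simpa using h1)]
  exact List.getElem_append_left (by omega)

theorem pvGetD_append_last (xs : List Int) (y d : Int) :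
    PySem.List.pyGetD (xs ++ [y]) (xs.length : Int) d = y := by
  rw [PySem.List.pyGetD_eq_getElem _ _ (by positivity) (by simp)]
  simp

theorem pvGetD_last (xs : List Int) (y d : Int) (h : xs ≠ []) :
    PySem.List.pyGetD (xs ++ [y]) ((xs.length : Int) - 1) d = xs.getLast h := by
  have hn : 1 ≤ xs.length := List.length_pos_of_ne_nil h
  have : ((xs.length : Int) - 1) = ((xs.length - 1 : Nat) : Int) := by omega
  rw [this, PySem.List.pyGetD_eq_getElem _ _ (by positivity) (by simp)]
  rw [List.getElem_append_left (by omega)]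
  simp [List.getLast_eq_getElem, Int.toNat_natCast]

theorem pvSlice_append_left (xs : List Int) (y a b : Int) (h0 : 0 ≤ a) (h1 : 0 ≤ b)
    (h2 : b ≤ (xs.length : Int)) :
    PySem.List.slice (xs ++ [y]) (some a) (some b) = PySem.List.slice xs (some a) (some b) := by
  rw [PySem.List.slice_toNat _ h0 h1, PySem.List.slice_toNat _ h0 h1]
  by_cases ha : a.toNat ≤ xs.length
  · rw [List.drop_append_of_le_length ha]
    exact List.take_append_of_le_length (by simp; omega)
  · have hz : b.toNat - a.toNat = 0 := by omega
    simp [hz]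

theorem pvSlice_append_last (xs : List Int) (y a : Int) (h0 : 0 ≤ a) (h2 : a ≤ (xs.length : Int)) :
    PySem.List.slice (xs ++ [y]) (some a) (some ((xs.length : Int) + 1))
      = PySem.List.slice xs (some a) (some (xs.length : Int)) ++ [y] := by
  rw [PySem.List.slice_toNat _ h0 (by omega), PySem.List.slice_toNat _ h0 (by positivity)]
  rw [List.drop_append_of_le_length (by omega)]
  rw [List.take_of_length_le (by simp; omega), List.take_of_length_le (by simp)]


theorem pvGetLastD_cons {α : Type} (a : α) (L : List α) (d : α) (h : L ≠ []) :
    (a :: L).getLastD d = L.getLastD d := by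
  cases L with
  | nil => exact absurd rfl h
  | cons b L' => simp

theorem pvSlice_self (xs : List Int) (a : Int) (h0 : 0 ≤ a) :
    PySem.List.slice xs (some a) (some a) = [] := by
  rw [PySem.List.slice_toNat _ h0 h0]
  simp

-- L1: a gap right before the appended element opens a new singleton cluster
theorem pvSlices_new (xs : List Int) (y : Int) (cs : List Int) (c : Int)
    (hc0 : 0 ≤ c) (hcn : c ≤ (xs.length : Int))
    (hbs : ∀ b ∈ cs, 0 ≤ b ∧ b ≤ (xs.length : Int)) :
    pvSlices (xs ++ [y]) c (cs ++ [(xs.length : Int), (xs.length : Int) + 1])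
      = pvSlices xs c (cs ++ [(xs.length : Int)]) ++ [[y]] := by
  induction cs generalizing c with
  | nil =>
      simp only [List.nil_append, pvSlices]
      rw [pvSlice_append_left xs y c _ hc0 (by positivity) le_rfl,
          pvSlice_append_last xs y _ (by positivity) le_rfl,
          pvSlice_self xs ((xs.length : Int)) (by positivity)]
      simp
  | cons b cs ih =>
      simp only [List.cons_append, pvSlices]
      obtain ⟨hb0, hbn⟩ := hbs b (by simp)
      rw [pvSlice_append_left xs y c b hc0 hb0 hbn,
          ih b hb0 hbn (fun b' hb' => hbs b' (by simp [hb']))]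

-- L2: no gap before the appended element: it joins the last cluster
theorem pvSlices_extend (xs : List Int) (y : Int) (cs : List Int) (c : Int)
    (hc0 : 0 ≤ c) (hcn : c ≤ (xs.length : Int))
    (hbs : ∀ b ∈ cs, 0 ≤ b ∧ b ≤ (xs.length : Int)) :
    pvSlices (xs ++ [y]) c (cs ++ [(xs.length : Int) + 1])
      = (pvSlices xs c (cs ++ [(xs.length : Int)])).dropLast
        ++ [(pvSlices xs c (cs ++ [(xs.length : Int)])).getLastD [] ++ [y]] := by
  induction cs generalizing c with
  | nil =>
      simp only [List.nil_append, pvSlices]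
      rw [pvSlice_append_last xs y c hc0 hcn]
      simp [List.getLastD]
  | cons b cs ih =>
      simp only [List.cons_append, pvSlices]
      obtain ⟨hb0, hbn⟩ := hbs b (by simp)
      have hne : pvSlices xs b (cs ++ [(xs.length : Int)]) ≠ [] := by
        intro h
        have := pvSlices_length xs b (cs ++ [(xs.length : Int)])
        rw [h] at this; simp at this
      rw [pvSlice_append_left xs y c b hc0 hb0 hbn,
          ih b hb0 hbn (fun b' hb' => hbs b' (by simp [hb'])),
          List.dropLast_cons_of_ne_nil hne, pvGetLastD_cons _ _ _ hne]
      simp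

-- every boundary index lies in [0, len xs]
theorem pvBnd_bounds (xs : List Int) (g : Int) :
    ∀ b ∈ pvBnd xs g, 0 ≤ b ∧ b ≤ (xs.length : Int) := by
  intro b hb
  have := List.mem_of_mem_filter hb
  rw [PySem.List.mem_pyRange_one] at this
  omega

-- the boundary list of xs ++ [y]
theorem pvBnd_snoc (xs : List Int) (y g : Int) (h : xs ≠ []) :
    pvBnd (xs ++ [y]) g
      = pvBnd xs g ++ (if g < y - xs.getLast h then [(xs.length : Int)] else []) := by
  have hn : 1 ≤ xs.length := List.length_pos_of_ne_nil h
  unfold pvBnd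
  have hlen : ((xs ++ [y]).length : Int) = (xs.length : Int) + 1 := by simp
  rw [hlen, PySem.List.pyRange_one_succ_right (by omega : (1:Int) ≤ (xs.length : Int)),
      List.filter_append]
  congr 1
  · apply List.filter_congr
    intro i hi
    rw [PySem.List.mem_pyRange_one] at hi
    rw [pvGetD_append_left xs [y] i 0 (by omega) (by omega),
        pvGetD_append_left xs [y] (i - 1) 0 (by omega) (by omega)]
  · rw [List.filter_singleton]
    rw [pvGetD_append_last xs y 0, pvGetD_last xs y 0 h]
    by_cases hg : g < y - xs.getLast h <;> simp [hg]

-- B's cuts/slice comprehension computes pvSlices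
theorem pvMapCutsNat (xs : List Int) (cs : List Int) (c : Int) :
    (List.range cs.length).map (fun k =>
      PySem.List.slice xs (some ((c :: cs).getD k 0)) (some ((c :: cs).getD (k + 1) 0)))
      = pvSlices xs c cs := by
  induction cs generalizing c with
  | nil => simp [pvSlices]
  | cons c' cs ih =>
      simp only [List.length_cons]
      rw [List.range_succ_eq_map]
      simp only [List.map_cons, List.map_map, List.getD_cons_zero, List.getD_cons_succ]
      simp only [pvSlices]
      congr 1
      rw [← ih c']
      apply List.map_congr_left
      intro k _
      simp [Function.comp]

theorem pvMapCuts (xs : List Int) (c : Int) (cs : List Int) :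
    (PySem.List.pyRange 0 (((c :: cs).length : Int) - 1) 1).map
      (fun j => PySem.List.slice xs (some (PySem.List.pyGetD (c :: cs) j 0))
        (some (PySem.List.pyGetD (c :: cs) (j + 1) 0)))
      = pvSlices xs c cs := by
  rw [(by simp : (((c :: cs).length : Int) - 1) = ((cs.length : Nat) : Int)),
      PySem.List.pyRange_one, List.map_map, ← pvMapCutsNat xs cs c]
  apply List.map_congr_left
  intro k hk
  simp only [Function.comp, zero_add]
  have e2 : PySem.List.pyGetD (c :: cs) (((k : Nat) : Int) + 1) 0 = (c :: cs).getD (k + 1) 0 := by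
    have h1 : ((k : Nat) : Int) + 1 = ((k + 1 : Nat) : Int) := by push_cast; ring
    rw [h1, PySem.List.pyGetD_natCast]
  rw [e2, PySem.List.pyGetD_natCast]

-- B in pvSlices form
theorem pvB_eq (xs : List Int) (g : Int) (h : xs ≠ []) :
    cluster_pages_py_alt xs g = pvSlices xs 0 (pvBnd xs g ++ [(xs.length : Int)]) := by
  unfold cluster_pages_py_alt
  rw [if_neg h]
  exact pvMapCuts xs 0 (pvBnd xs g ++ [(xs.length : Int)])

-- A's loop step on a snoc
theorem pvA_snoc (xs : List Int) (y g : Int) (h : xs ≠ []) :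
    cluster_pages_py (xs ++ [y]) g
      = pvStep g (cluster_pages_py xs g) (xs.getLast h) y := by
  have hn : 1 ≤ xs.length := List.length_pos_of_ne_nil h
  unfold cluster_pages_py
  rw [if_neg (by simp), if_neg h]
  have hlen : ((xs ++ [y]).length : Int) = (xs.length : Int) + 1 := by simp
  rw [hlen, PySem.List.pyRange_one_succ_right (by omega : (1:Int) ≤ (xs.length : Int)),
      List.foldl_append]
  have hinit : PySem.List.pyGetD (xs ++ [y]) 0 0 = PySem.List.pyGetD xs 0 0 := by
    have : (0 : Int) = ((0 : Nat) : Int) := rfl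
    exact pvGetD_append_left xs [y] 0 0 le_rfl (by omega)
  rw [hinit]
  rw [PySem.List.foldl_congr_mem (PySem.List.pyRange 1 (xs.length : Int)) _ (fun clusters i =>
      if PySem.List.pyGetD xs i 0 - PySem.List.pyGetD xs (i - 1) 0 ≤ g then
        clusters.dropLast ++ [clusters.getLastD [] ++ [PySem.List.pyGetD xs i 0]]
      else clusters ++ [[PySem.List.pyGetD xs i 0]]) _
    (by
      intro acc i hi
      rw [PySem.List.mem_pyRange_one] at hi
      rw [pvGetD_append_left xs [y] i 0 (by omega) (by omega),
          pvGetD_append_left xs [y] (i - 1) 0 (by omega) (by omega)])]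
  simp only [List.foldl_cons, List.foldl_nil]
  rw [pvGetD_append_last xs y 0, pvGetD_last xs y 0 h]
  rfl

-- A computes pvSlices on its boundary list
theorem pvA_eq (xs : List Int) (g : Int) (h : xs ≠ []) :
    cluster_pages_py xs g = pvSlices xs 0 (pvBnd xs g ++ [(xs.length : Int)]) := by
  induction xs using List.reverseRecOn with
  | nil => exact absurd rfl h
  | append_singleton ys y ih =>
      by_cases hys : ys = []
      · subst hys
        simp only [List.nil_append]
        have hA : cluster_pages_py [y] g = [[y]] := by
          unfold cluster_pages_py
          rw [if_neg (by simp)]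
          simp [PySem.List.pyRange_one_eq_nil, PySem.List.pyGetD_zero]
        have hB : pvBnd [y] g = [] := by
          unfold pvBnd
          simp [PySem.List.pyRange_one_eq_nil]
        rw [hA, hB]
        simp only [List.nil_append, pvSlices]
        rw [PySem.List.slice_toNat _ le_rfl (by simp)]
        simp
      · rw [pvA_snoc ys y g hys, ih hys, pvBnd_snoc ys y g hys]
        have hbnds := pvBnd_bounds ys g
        have hlen : ((ys ++ [y]).length : Int) = (ys.length : Int) + 1 := by simp
        by_cases hg : g < y - ys.getLast hys
        · rw [if_pos hg]
          rw [hlen]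
          have : (pvBnd ys g ++ [(ys.length : Int)]) ++ [(ys.length : Int) + 1]
              = pvBnd ys g ++ [(ys.length : Int), (ys.length : Int) + 1] := by simp
          rw [this, pvSlices_new ys y (pvBnd ys g) 0 le_rfl (by positivity) hbnds]
          unfold pvStep
          rw [if_neg (by omega)]
        · rw [if_neg hg]
          rw [hlen, List.append_nil,
              pvSlices_extend ys y (pvBnd ys g) 0 le_rfl (by positivity) hbnds]
          unfold pvStep
          rw [if_pos (by omega)]

-- ===== VERDICT (by name: the statement is the Claim_ definition above) =====
theorem cluster_pages_py_spec : Claim_equal_cluster_pages_py := by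
  intro detected max_gap _
  unfold Spec_cluster_pages_py
  by_cases h : detected = []
  · subst h; rfl
  · rw [pvA_eq detected max_gap h, pvB_eq detected max_gap h]
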